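-- pv_equiv track=rewrite | github.com/Jneck/Algorithm | 프로그래머스/unrated/159994. 카드 뭉치/카드 뭉치.py | solution
-- ===== SOURCE A (Python) =====
-- def solution(cards1, cards2, goal):
--     cards1Idx = 0
--     cards2Idx = 0
--     for word in goal:
--         isWord = False
--         if len(cards1) > cards1Idx:
--             if cards1[cards1Idx] == word:
--                 cards1Idx += 1
--                 isWord = True
--         if len(cards2) > cards2Idx:
--             if cards2[cards2Idx] == word:
--                 cards2Idx += 1
--                 isWord = True
--         if not isWord:
--             return 'No'
--     return 'Yes'
-- ===== SOURCE B (Python) =====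
-- def solution(cards1, cards2, goal):
--     def matches(cards, goal):
--         out = []
--         i = 0
--         for w in goal:
--             if i < len(cards) and cards[i] == w:
--                 i += 1
--                 out.append(True)
--             else:
--                 out.append(False)
--         return out
--     m1 = matches(cards1, goal)
--     m2 = matches(cards2, goal)
--     return 'Yes' if all(a or b for a, b in zip(m1, m2)) else 'No'
-- ===== Notes on version B (the rewrite author's own statement) =====
-- stated objective: alternative
-- what changed: Instead of one fused loop with two pointers and an early 'No' return, B computes two independent per-position match arrays (one pointer walk per card pile) and then combines them in a final zip/all pass.
import Mathlib
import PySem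

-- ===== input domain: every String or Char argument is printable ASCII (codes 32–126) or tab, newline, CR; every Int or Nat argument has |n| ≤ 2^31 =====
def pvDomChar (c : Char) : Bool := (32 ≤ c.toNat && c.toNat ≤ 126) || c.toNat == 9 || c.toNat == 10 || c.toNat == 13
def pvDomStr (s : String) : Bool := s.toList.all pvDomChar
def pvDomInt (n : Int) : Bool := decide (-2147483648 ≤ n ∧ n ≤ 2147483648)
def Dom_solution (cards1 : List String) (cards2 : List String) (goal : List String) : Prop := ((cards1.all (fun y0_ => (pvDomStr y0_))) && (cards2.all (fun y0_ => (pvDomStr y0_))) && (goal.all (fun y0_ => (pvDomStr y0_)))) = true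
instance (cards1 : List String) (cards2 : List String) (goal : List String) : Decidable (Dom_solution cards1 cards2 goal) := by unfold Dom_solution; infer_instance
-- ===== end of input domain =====

-- B replaces A's single fused two-pointer loop (with early 'No' return) by two independent
-- per-pile match-array walks combined in a final zip/all pass; same cost, different decomposition.


-- ===== PORT A =====
-- the for-loop over goal with mutable cards1Idx/cards2Idx and early return 'No'
def solGo (cards1 : List String) (cards2 : List String) : List String → Nat → Nat → String
  | [], _, _ => "Yes"
  | w :: rest, i1, i2 =>
    -- isWord = False; if len(cards1) > i1: if cards1[i1] == w: i1 += 1; isWord = True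
    let s1 : Nat × Bool :=
      if h : i1 < cards1.length then
        if cards1[i1] = w then (i1 + 1, true) else (i1, false)
      else (i1, false)
    let s2 : Nat × Bool :=
      if h : i2 < cards2.length then
        if cards2[i2] = w then (i2 + 1, true) else (i2, false)
      else (i2, false)
    if !(s1.2 || s2.2) then "No" else solGo cards1 cards2 rest s1.1 s2.1

def solution (cards1 : List String) (cards2 : List String) (goal : List String) : String :=
  solGo cards1 cards2 goal 0 0

-- ===== PORT B =====
-- matches(cards, goal): one pointer walk producing a per-position Bool list
def bMatch (cards : List String) : List String → Nat → List Bool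
  | [], _ => []
  | w :: rest, i =>
    if h : i < cards.length then
      if cards[i] = w then true :: bMatch cards rest (i + 1)
      else false :: bMatch cards rest i
    else false :: bMatch cards rest i

def solution_alt (cards1 : List String) (cards2 : List String) (goal : List String) : String :=
  let m1 := bMatch cards1 goal 0
  let m2 := bMatch cards2 goal 0
  if (m1.zip m2).all (fun p => p.1 || p.2) then "Yes" else "No"

-- ===== PRECONDITION & SPEC =====
def Spec_solution (cards1 : List String) (cards2 : List String) (goal : List String) (out : String) : Prop := out = solution_alt cards1 cards2 goal
instance (cards1 : List String) (cards2 : List String) (goal : List String) (out : String) : Decidable (Spec_solution cards1 cards2 goal out) := by unfold Spec_solution; infer_instance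

-- ===== CLAIM (what is proved, stated in full; the proofs are below) =====
def Claim_equal_solution : Prop := ∀ (cards1 : List String) (cards2 : List String) (goal : List String), Dom_solution cards1 cards2 goal → Spec_solution cards1 cards2 goal (solution cards1 cards2 goal)

-- ===== LEMMAS AND PROOFS =====
theorem solGo_eq_bMatch (cards1 cards2 : List String) :
    ∀ (goal : List String) (i1 i2 : Nat),
      solGo cards1 cards2 goal i1 i2 =
        if ((bMatch cards1 goal i1).zip (bMatch cards2 goal i2)).all (fun p => p.1 || p.2)
        then "Yes" else "No" := by
  intro goal
  induction goal with
  | nil => intro i1 i2; simp [solGo, bMatch]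
  | cons w rest ih =>
    intro i1 i2
    simp only [solGo, bMatch]
    by_cases h1 : i1 < cards1.length <;> by_cases h2 : i2 < cards2.length <;>
      simp only [h1, h2, dif_pos, dif_neg, not_false_iff]
    all_goals try by_cases e1 : cards1[i1] = w
    all_goals try by_cases e2 : cards2[i2] = w
    all_goals simp_all [List.zip, List.all_cons, ih]

-- ===== VERDICT (by name: the statement is the Claim_ definition above) =====
theorem solution_spec : Claim_equal_solution := by
  intro cards1 cards2 goal _
  unfold Spec_solution solution solution_alt
  exact solGo_eq_bMatch cards1 cards2 goal 0 0
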